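-- pv_equiv track=rewrite | github.com/Sabrina-Aguirre/practica_python | juego_de_cartas.py | ver_quien_gano
-- ===== SOURCE A (Python) =====
-- def ver_quien_gano(resultados):
--     ganadores = []
--     j = 0
--     while j < len(resultados):
--         if j == 21:
--             ganadores.append(1)
--         else:
--             ganadores.append(0)
--         j = j + 1
--     return ganadores
-- ===== SOURCE B (Python) =====
-- def ver_quien_gano(resultados):
--     n = len(resultados)
--     if n <= 21:
--         return [0] * n
--     return [0] * 21 + [1] + [0] * (n - 22)
-- ===== Notes on version B (the rewrite author's own statement) =====
-- stated objective: simpler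
-- what changed: Replaced A's per-index loop with conditional append by composing the result from three constant segments: 21 zeros, the marker 1, and the remaining zeros (or all zeros when the list is too short) - no loop, no indexing, no element-wise test.
import Mathlib
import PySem

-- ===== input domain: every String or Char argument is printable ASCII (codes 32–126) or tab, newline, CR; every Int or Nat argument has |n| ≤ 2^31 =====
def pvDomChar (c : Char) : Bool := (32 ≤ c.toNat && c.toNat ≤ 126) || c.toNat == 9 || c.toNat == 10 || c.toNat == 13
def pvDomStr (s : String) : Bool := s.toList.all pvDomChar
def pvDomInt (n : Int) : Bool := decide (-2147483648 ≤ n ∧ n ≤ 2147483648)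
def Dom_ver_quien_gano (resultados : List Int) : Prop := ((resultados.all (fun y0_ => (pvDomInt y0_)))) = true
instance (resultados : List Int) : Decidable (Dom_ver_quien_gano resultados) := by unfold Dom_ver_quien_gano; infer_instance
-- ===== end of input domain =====

-- B replaces A's per-index loop with a three-segment concatenation (zeros ++ marker ++ zeros): simpler decomposition.


-- ===== PORT A =====
-- while j < len: append (1 if j == 21 else 0); ported as a fold over pyRange
def ver_quien_gano (resultados : List Int) : List Int :=
  (PySem.List.pyRange 0 (resultados.length) 1).foldl
    (fun ganadores j => ganadores ++ [if j = 21 then (1 : Int) else 0]) []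

-- ===== PORT B =====
-- B: three constant segments: 21 zeros ++ [1] ++ trailing zeros; all zeros when too short
def ver_quien_gano_alt (resultados : List Int) : List Int :=
  let n := resultados.length
  if n ≤ 21 then List.replicate n (0 : Int)
  else List.replicate 21 (0 : Int) ++ [1] ++ List.replicate (n - 22) (0 : Int)

-- ===== PRECONDITION & SPEC =====
def Spec_ver_quien_gano (resultados : List Int) (out : List Int) : Prop := out = ver_quien_gano_alt resultados
instance (resultados : List Int) (out : List Int) : Decidable (Spec_ver_quien_gano resultados out) := by unfold Spec_ver_quien_gano; infer_instance

-- ===== CLAIM (what is proved, stated in full; the proofs are below) =====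
def Claim_equal_ver_quien_gano : Prop := ∀ (resultados : List Int), Dom_ver_quien_gano resultados → Spec_ver_quien_gano resultados (ver_quien_gano resultados)

-- ===== LEMMAS AND PROOFS =====
lemma ports_agree (resultados : List Int) :
    ver_quien_gano resultados = ver_quien_gano_alt resultados := by
  unfold ver_quien_gano ver_quien_gano_alt
  rw [PySem.List.foldl_append_singleton_eq_map, PySem.List.pyRange_zero_natCast]
  simp only [List.map_map, List.nil_append]
  apply List.ext_getElem
  · by_cases h : resultados.length ≤ 21 <;> simp [h] <;> omega
  · intro i h1 h2
    by_cases h : resultados.length ≤ 21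
    · simp only [h, if_true, List.getElem_replicate, List.getElem_map, List.getElem_range,
        Function.comp_apply]
      split_ifs with hi
      · exfalso; simp at h1; omega
      · rfl
    · simp only [h, if_false, List.getElem_map, List.getElem_range, Function.comp_apply,
        List.getElem_append, List.getElem_replicate, List.length_replicate,
        List.length_append, List.length_cons, List.length_nil]
      split_ifs with h3 h4 h5
      · exfalso; omega
      · have hi : i - 21 = 0 := by omega
        simp [hi]
      · exfalso; omega
      · rfl
      · exfalso; omega
      · rfl

-- ===== VERDICT (by name: the statement is the Claim_ definition above) =====
theorem ver_quien_gano_spec : Claim_equal_ver_quien_gano := by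
  intro resultados _
  unfold Spec_ver_quien_gano
  exact ports_agree resultados
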